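-- pv_equiv track=rewrite | github.com/issdandavis/SCBE-AETHERMOORE | demo/pivot_knowledge.py | _encode_avali
-- ===== SOURCE A (Python) =====
-- from typing import Any, Dict, List, Optional, Tuple
--
-- def _encode_avali(text: str) -> str:
--     """Avali: Transport reverses word order and adds diacritics."""
--     diacritics = {
--         "a": "\u00e4", "e": "\u00eb", "i": "\u00ef",
--         "o": "\u00f6", "u": "\u00fc",
--     }
--     words = text.split()
--     encoded_words: List[str] = []
--     for word in words:
--         reversed_word = word[::-1]
--         diac_word: List[str] = []
--         for ch in reversed_word:
--             diac_word.append(diacritics.get(ch.lower(), ch))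
--         encoded_words.append("".join(diac_word))
--     return " ".join(encoded_words)
-- ===== SOURCE B (Python) =====
-- _V = "aeiouAEIOU"
-- _D = "\u00e4\u00eb\u00ef\u00f6\u00fc"
--
-- def _encode_avali(text: str) -> str:
--     """Avali: single pass with an accumulator, building each reversed word
--     back-to-front by prepending the mapped char; no split(), no slicing,
--     vowel lookup by index into a vowel string instead of a dict."""
--     words = []
--     cur = ""
--     for ch in text:
--         if ch.isspace():
--             if cur:
--                 words.append(cur)
--                 cur = ""
--         else:
--             i = _V.find(ch)
--             cur = (_D[i % 5] if i >= 0 else ch) + cur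
--     if cur:
--         words.append(cur)
--     return " ".join(words)
-- ===== Notes on version B (the rewrite author's own statement) =====
-- stated objective: alternative
-- what changed: Replaces A's staged split/slice-reverse/dict-map pipeline with a single left-to-right pass over the string that builds each reversed word back-to-front by prepending the mapped character to an accumulator (flushed on whitespace), with the vowel substitution done by index into a vowel string instead of a dict lookup on the lowercased char.
import Mathlib
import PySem

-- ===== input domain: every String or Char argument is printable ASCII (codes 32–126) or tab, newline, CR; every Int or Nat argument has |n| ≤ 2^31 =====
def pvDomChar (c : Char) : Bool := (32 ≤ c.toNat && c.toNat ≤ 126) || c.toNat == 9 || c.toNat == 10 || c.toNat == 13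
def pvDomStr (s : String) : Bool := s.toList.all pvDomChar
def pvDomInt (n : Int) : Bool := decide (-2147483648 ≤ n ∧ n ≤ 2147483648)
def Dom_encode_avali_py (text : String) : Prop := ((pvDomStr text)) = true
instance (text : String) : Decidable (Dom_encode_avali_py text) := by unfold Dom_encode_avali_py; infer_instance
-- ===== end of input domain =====

-- B makes a single pass over the string, building each reversed word back-to-front by prepending
-- the mapped char (vowel looked up by index in a vowel string, not a dict); no split(), no slicing.

-- ===== PORT A =====
-- literal port of _encode_avali: split into words, reverse each word, map each char through the 5-key dict on its lowercase
def encode_avali_py (text : String) : String :=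
  let diacritics : PySem.Dict Char Char :=
    PySem.Dict.mk [('a', 'ä'), ('e', 'ë'), ('i', 'ï'), ('o', 'ö'), ('u', 'ü')]
  let words := PySem.Chars.split₀ text.toList
  let encoded_words : List (List Char) :=
    words.foldl (fun acc word =>
      let reversed_word := (PySem.List.slice? word none none (-1)).getD []
      let diac_word : List Char :=
        reversed_word.foldl (fun dw ch => dw ++ [diacritics.getD (PySem.Chars.lowerChar ch) ch]) []
      acc ++ [diac_word]) []
  String.ofList (PySem.Chars.join [' '] encoded_words)

-- ===== PORT B =====
-- per-char mapping of Source B: i = _V.find(ch); _D[i % 5] if i >= 0 else ch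
-- (the indexing _D[i % 5] cannot raise since 0 ≤ i % 5 < 5, so pyGetD with default ch is exact)
def pvMapChar (ch : Char) : Char :=
  let i := PySem.Chars.find "aeiouAEIOU".toList [ch]
  if i ≥ 0 then PySem.List.pyGetD "äëïöü".toList (PySem.Int.mod i 5) ch else ch

def encode_avali_py_alt (text : String) : String :=
  let st := text.toList.foldl (fun (st : List (List Char) × List Char) ch =>
      if PySem.Chars.isspace ch then
        if st.2.isEmpty then st else (st.1 ++ [st.2], [])
      else (st.1, pvMapChar ch :: st.2)) ([], [])
  let words := if st.2.isEmpty then st.1 else st.1 ++ [st.2]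
  String.ofList (PySem.Chars.join [' '] words)

-- ===== PRECONDITION & SPEC =====
def Spec_encode_avali_py (text : String) (out : String) : Prop := out = encode_avali_py_alt text
instance (text : String) (out : String) : Decidable (Spec_encode_avali_py text out) := by unfold Spec_encode_avali_py; infer_instance

-- ===== CLAIM =====
def Claim_equal_encode_avali_py : Prop := ∀ (text : String), Dom_encode_avali_py text → Spec_encode_avali_py text (encode_avali_py text)

-- ===== LEMMAS AND PROOFS =====

-- A's per-char map (5-key dict on the lowercased char) equals B's find-index map on every ASCII char
set_option maxRecDepth 4000 in
theorem pvChar_check : ∀ n ∈ List.range 128,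
    decide ((PySem.Dict.mk [('a', 'ä'), ('e', 'ë'), ('i', 'ï'), ('o', 'ö'), ('u', 'ü')]).getD
        (PySem.Chars.lowerChar (Char.ofNat n)) (Char.ofNat n) = pvMapChar (Char.ofNat n)) = true := by
  decide

theorem pvAsciiLt (c : Char) (hc : pvDomChar c = true) : c.toNat < 128 := by
  unfold pvDomChar at hc
  simp only [Bool.or_eq_true, Bool.and_eq_true, decide_eq_true_eq, beq_iff_eq] at hc
  omega

theorem pvChar_eq (c : Char) (hc : pvDomChar c = true) :
    (PySem.Dict.mk [('a', 'ä'), ('e', 'ë'), ('i', 'ï'), ('o', 'ö'), ('u', 'ü')]).getD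
      (PySem.Chars.lowerChar c) c = pvMapChar c := by
  have h := pvChar_check c.toNat (List.mem_range.mpr (pvAsciiLt c hc))
  rw [Char.ofNat_toNat] at h
  exact of_decide_eq_true h

-- every char of a word of split₀ comes from the input (or the go-accumulators)
theorem pvSplit_go_mem (cs : List Char) : ∀ (cur : List Char) (acc : List (List Char))
    (w : List Char), w ∈ PySem.Chars.split₀.go cs cur acc → ∀ c ∈ w,
    c ∈ cs ∨ c ∈ cur ∨ ∃ w' ∈ acc, c ∈ w' := by
  induction cs with
  | nil =>
    intro cur acc w hw c hc
    simp only [PySem.Chars.split₀.go] at hw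
    split at hw
    · exact Or.inr (Or.inr ⟨w, List.mem_reverse.mp hw, hc⟩)
    · rcases List.mem_cons.mp (List.mem_reverse.mp hw) with h | h
      · exact Or.inr (Or.inl (List.mem_reverse.mp (h ▸ hc)))
      · exact Or.inr (Or.inr ⟨w, h, hc⟩)
  | cons d rest ih =>
    intro cur acc w hw c hc
    simp only [PySem.Chars.split₀.go] at hw
    split at hw
    · split at hw
      · rcases ih [] acc w hw c hc with h | h | h
        · exact Or.inl (List.mem_cons_of_mem _ h)
        · exact absurd h (List.not_mem_nil)
        · exact Or.inr (Or.inr h)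
      · rcases ih [] (cur.reverse :: acc) w hw c hc with h | h | ⟨w', hw', hc'⟩
        · exact Or.inl (List.mem_cons_of_mem _ h)
        · exact absurd h (List.not_mem_nil)
        · rcases List.mem_cons.mp hw' with h | h
          · exact Or.inr (Or.inl (List.mem_reverse.mp (h ▸ hc')))
          · exact Or.inr (Or.inr ⟨w', h, hc'⟩)
    · rcases ih (d :: cur) acc w hw c hc with h | h | h
      · exact Or.inl (List.mem_cons_of_mem _ h)
      · rcases List.mem_cons.mp h with h | h
        · exact Or.inl (h ▸ List.mem_cons_self ..)
        · exact Or.inr (Or.inl h)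
      · exact Or.inr (Or.inr h)

theorem pvSplit_mem (cs : List Char) (w : List Char) (hw : w ∈ PySem.Chars.split₀ cs)
    (c : Char) (hc : c ∈ w) : c ∈ cs := by
  rcases pvSplit_go_mem cs [] [] w hw c hc with h | h | ⟨w', hw', _⟩
  · exact h
  · exact absurd h (List.not_mem_nil)
  · exact absurd hw' (List.not_mem_nil)

-- B's one-pass loop computes, word by word, the reversed mapped words of split₀
theorem pvLoop (cs : List Char) : ∀ (cur : List Char) (acc : List (List Char)),
    (let r := cs.foldl (fun (st : List (List Char) × List Char) ch =>
        if PySem.Chars.isspace ch then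
          if st.2.isEmpty then st else (st.1 ++ [st.2], [])
        else (st.1, pvMapChar ch :: st.2))
      (acc.reverse.map (fun w => (w.map pvMapChar).reverse), cur.map pvMapChar);
     if r.2.isEmpty then r.1 else r.1 ++ [r.2])
    = (PySem.Chars.split₀.go cs cur acc).map (fun w => (w.map pvMapChar).reverse) := by
  induction cs with
  | nil =>
    intro cur acc
    simp only [List.foldl_nil, PySem.Chars.split₀.go, List.isEmpty_map]
    by_cases h : cur.isEmpty
    · simp [h]
    · simp [h, List.map_reverse]
  | cons c rest ih =>
    intro cur acc
    simp only [List.foldl_cons]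
    by_cases hsp : PySem.Chars.isspace c
    · simp only [hsp, if_true, List.isEmpty_map, PySem.Chars.split₀.go]
      by_cases hcur : cur.isEmpty
      · have : cur = [] := List.isEmpty_iff.mp hcur
        subst this
        simpa using ih [] acc
      · simp only [hcur]
        have := ih [] (cur.reverse :: acc)
        simpa [List.map_reverse] using this
    · simp only [hsp, PySem.Chars.split₀.go]
      exact ih (c :: cur) acc

-- ===== VERDICT =====
theorem encode_avali_py_spec : Claim_equal_encode_avali_py := by
  intro text hdom
  unfold Spec_encode_avali_py encode_avali_py encode_avali_py_alt
  have hall : ∀ c ∈ text.toList, pvDomChar c = true := by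
    unfold Dom_encode_avali_py pvDomStr at hdom
    simpa [List.all_eq_true] using hdom
  dsimp only
  have hB := pvLoop text.toList [] []
  simp only [List.map_nil, List.reverse_nil] at hB
  rw [hB]
  simp only [PySem.List.slice?_none_none_neg_one, Option.getD_some,
    PySem.List.foldl_append_singleton_eq_map]
  apply congrArg String.ofList
  apply congrArg (PySem.Chars.join [' '])
  rw [List.nil_append]
  refine List.map_congr_left fun w hw => ?_
  rw [← List.map_reverse]
  exact List.map_congr_left fun c hc =>
    pvChar_eq c (hall c (pvSplit_mem _ _ hw _ (List.mem_reverse.mp hc)))
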